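-- pv_equiv track=rewrite | github.com/Chepell/SF_DS_Pro | My/22_homework.py | holes_count
-- ===== SOURCE A (Python) =====
-- def holes_count(number):
--     holes_dict = {
--         '0': 1,
--         '1': 0,
--         '2': 0,
--         '3': 0,
--         '4': 1,
--         '5': 0,
--         '6': 1,
--         '7': 0,
--         '8': 2,
--         '9': 1
--     }
--
--     num_str = str(number)
--
--     counter = 0
--
--     for number in num_str:
--         counter += holes_dict[number]
--
--     return counter
-- ===== SOURCE B (Python) =====
-- def holes_count(number):
--     holes = (1, 0, 0, 0, 1, 0, 1, 0, 2, 1)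
--     if number == 0:
--         return 1
--     n = number
--     total = 0
--     while n > 0:
--         total += holes[n % 10]
--         n //= 10
--     return total
-- ===== Notes on version B (the rewrite author's own statement) =====
-- stated objective: alternative
-- what changed: B never builds the decimal string: it extracts digits arithmetically with a divmod-by-ten loop and weights them by a tuple-indexed hole table, instead of A's scan over str(number) with a dict lookup per character.
import Mathlib
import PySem

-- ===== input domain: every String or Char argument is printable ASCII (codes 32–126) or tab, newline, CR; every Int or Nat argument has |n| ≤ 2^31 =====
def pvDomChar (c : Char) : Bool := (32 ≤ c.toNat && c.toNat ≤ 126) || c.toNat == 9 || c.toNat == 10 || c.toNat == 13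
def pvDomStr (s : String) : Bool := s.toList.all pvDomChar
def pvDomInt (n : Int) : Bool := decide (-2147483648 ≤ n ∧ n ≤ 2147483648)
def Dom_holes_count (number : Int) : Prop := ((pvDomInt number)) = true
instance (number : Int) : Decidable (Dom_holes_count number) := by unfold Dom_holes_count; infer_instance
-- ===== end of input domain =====

-- B extracts digits arithmetically with a divmod-by-ten loop and weights them by a tuple-indexed hole
-- table, instead of A's per-character scan over str(number); alternative algorithm, same cost.


-- ===== PORT A =====
-- the literal dict of A
def pvHolesDictA : PySem.Dict Char Int :=
  PySem.Dict.ofList [('0',1),('1',0),('2',0),('3',0),('4',1),('5',0),('6',1),('7',0),('8',2),('9',1)]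

-- per-character loop: counter += holes_dict[ch]; a missing key (KeyError) is modelled by the
-- Option accumulator becoming none (excluded by Pre_); final .getD 0 just unwraps the some.
def holes_count (number : Int) : Int :=
  let holes_dict := pvHolesDictA
  let num_str := PySem.Int.toChars number
  let counter : Option Int :=
    num_str.foldl (fun acc ch => acc.bind (fun a => (holes_dict.get? ch).map (fun h => a + h))) (some 0)
  counter.getD 0

-- ===== PORT B =====
-- the literal tuple 'holes' of B, indexed by digit value
def pvHolesTable : List Int := [1, 0, 0, 0, 1, 0, 1, 0, 2, 1]

-- the while-loop of B: while n > 0: total += holes[n % 10]; n //= 10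
-- (n % 10 < 10 always, so the tuple indexing holes[n % 10] is total: List.getD is exact here)
def pvWhileB (n : Nat) : Int :=
  if h : n = 0 then 0
  else pvHolesTable.getD (n % 10) 0 + pvWhileB (n / 10)
termination_by n
decreasing_by exact Nat.div_lt_self (Nat.pos_of_ne_zero h) (by norm_num)

def holes_count_alt (number : Int) : Int :=
  if number == 0 then 1 else pvWhileB number.toNat

-- ===== PRECONDITION & SPEC =====
-- Pre_ excludes exactly the negative numbers: there str(number) starts with '-' and
-- Python A raises KeyError on the '-' lookup.
def Pre_holes_count (number : Int) : Prop := 0 ≤ number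
instance (number : Int) : Decidable (Pre_holes_count number) := by unfold Pre_holes_count; infer_instance
def pvWitness_holes_count : Int := 48

def Spec_holes_count (number : Int) (out : Int) : Prop := out = holes_count_alt number
instance (number : Int) (out : Int) : Decidable (Spec_holes_count number out) := by unfold Spec_holes_count; infer_instance

-- ===== CLAIM (what is proved, stated in full; the proofs are below) =====
def Claim_equal_holes_count : Prop := ∀ (number : Int), Dom_holes_count number → Pre_holes_count number → Spec_holes_count number (holes_count number)

-- ===== LEMMAS AND PROOFS =====

-- hole value of a character via A's dict
def pvHv (c : Char) : Int := (pvHolesDictA.get? c).getD 0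

-- A's loop when every lookup succeeds
theorem foldA_some (d : PySem.Dict Char Int) (cs : List Char) (a : Int)
    (h : ∀ c ∈ cs, (d.get? c).isSome) :
    cs.foldl (fun acc ch => acc.bind (fun a => (d.get? ch).map (fun h => a + h))) (some a)
      = some (a + (cs.map (fun c => (d.get? c).getD 0)).sum) := by
  induction cs generalizing a with
  | nil => simp
  | cons c cs ih =>
    obtain ⟨v, hv⟩ := Option.isSome_iff_exists.mp (h c (by simp))
    simp only [List.foldl_cons, hv, Option.bind_some, Option.map_some]
    rw [ih _ (fun x hx => h x (by simp [hx]))]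
    simp [hv, add_assoc]

-- every character produced by toDigitsCore is a digitChar of a value < 10, or comes from acc
theorem mem_toDigitsCore (f : Nat) : ∀ (n : Nat) (acc : List Char) (c : Char),
    c ∈ Nat.toDigitsCore 10 f n acc → (∃ m, m < 10 ∧ c = Nat.digitChar m) ∨ c ∈ acc := by
  induction f with
  | zero => intro n acc c hc; exact Or.inr hc
  | succ f ih =>
    intro n acc c hc
    simp only [Nat.toDigitsCore] at hc
    by_cases hq : n / 10 = 0
    · rw [if_pos hq] at hc
      rcases List.mem_cons.mp hc with h | h
      · exact Or.inl ⟨n % 10, Nat.mod_lt _ (by norm_num), h⟩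
      · exact Or.inr h
    · rw [if_neg hq] at hc
      rcases ih (n / 10) _ c hc with h | h
      · exact Or.inl h
      · rcases List.mem_cons.mp h with h | h
        · exact Or.inl ⟨n % 10, Nat.mod_lt _ (by norm_num), h⟩
        · exact Or.inr h

theorem hv_digitChar (m : Nat) (hm : m < 10) :
    pvHv (Nat.digitChar m) = pvHolesTable.getD m 0 := by
  interval_cases m <;> decide

theorem lookup_digitChar (m : Nat) (hm : m < 10) :
    (pvHolesDictA.get? (Nat.digitChar m)).isSome := by
  interval_cases m <;> decide

-- the hole sum over B's digit recursion, extended to n = 0 (where str gives "0")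
def pvH (n : Nat) : Int :=
  pvHolesTable.getD (n % 10) 0 + if h : n / 10 = 0 then 0 else pvH (n / 10)
termination_by n
decreasing_by exact Nat.div_lt_self (by omega) (by norm_num)

-- the character hole sum over toDigitsCore equals pvH plus the accumulator's sum
theorem sum_toDigitsCore (f : Nat) : ∀ (n : Nat) (acc : List Char), n < f →
    ((Nat.toDigitsCore 10 f n acc).map pvHv).sum = pvH n + (acc.map pvHv).sum := by
  induction f with
  | zero => omega
  | succ f ih =>
    intro n acc hn
    simp only [Nat.toDigitsCore]
    by_cases hq : n / 10 = 0
    · rw [if_pos hq, pvH, dif_pos hq, List.map_cons, List.sum_cons,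
        hv_digitChar _ (Nat.mod_lt _ (by norm_num))]
      ring
    · rw [if_neg hq]
      have hlt : n / 10 < f :=
        lt_of_lt_of_le (Nat.div_lt_self (by omega) (by norm_num)) (by omega)
      rw [ih _ _ hlt]
      conv_rhs => rw [pvH]
      rw [dif_neg hq, List.map_cons, List.sum_cons,
        hv_digitChar _ (Nat.mod_lt _ (by norm_num))]
      ring

theorem pvH_eq_pvWhileB (n : Nat) (hn : n ≠ 0) : pvH n = pvWhileB n := by
  induction n using Nat.strong_induction_on with
  | _ n ih =>
    rw [pvH, pvWhileB, dif_neg hn]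
    by_cases hq : n / 10 = 0
    · rw [dif_pos hq, hq, pvWhileB]
      simp
    · rw [dif_neg hq, ih (n / 10) (Nat.div_lt_self (by omega) (by norm_num)) hq]

-- ===== VERDICT (by name: the statement is the Claim_ definition above) =====
theorem holes_count_spec : Claim_equal_holes_count := by
  intro number _ hpre
  unfold Spec_holes_count holes_count holes_count_alt
  dsimp only
  have hchars : PySem.Int.toChars number = Nat.toDigits 10 number.toNat := by
    simp [PySem.Int.toChars, not_lt.mpr hpre]
  rw [hchars]
  set m := number.toNat with hm
  have hall : ∀ c ∈ Nat.toDigits 10 m, (pvHolesDictA.get? c).isSome := by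
    intro c hc
    rcases mem_toDigitsCore _ _ _ _ hc with ⟨k, hk, rfl⟩ | h
    · exact lookup_digitChar k hk
    · simp at h
  rw [foldA_some _ _ _ hall]
  have hsum := sum_toDigitsCore (m + 1) m [] (by omega)
  simp only [List.map_nil, List.sum_nil, add_zero] at hsum
  have : (Nat.toDigits 10 m).map (fun c => (pvHolesDictA.get? c).getD 0) = (Nat.toDigits 10 m).map pvHv := rfl
  rw [Option.getD_some, zero_add, this, Nat.toDigits, hsum]
  by_cases h0 : number = 0
  · subst h0
    have h1 : pvH 0 = 1 := by rw [pvH]; decide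
    simp [hm, h1]
  · have hp' : (0:Int) ≤ number := hpre
    have hm0 : m ≠ 0 := by simp only [hm]; omega
    rw [if_neg (by simpa using h0), pvH_eq_pvWhileB m hm0]
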